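-- pv_equiv track=rewrite | github.com/theseus27/Coding-Challenges | Interviews/Citadel/points_visited.py | getMostVisited
-- ===== SOURCE A (Python) =====
-- def getMostVisited(n, sprints):
--     #Base case: 1 number
--     if len(sprints) == 1:
--         return sprints[0]
--
--     #Track how many times each goal is visited
--     #Put a buffer for 0
--     visits = [0 for _ in range(n+1)]
--     for i in range(1, len(sprints)):
--         earlier = min(sprints[i-1], sprints[i])
--         later = max(sprints[i-1], sprints[i])
--
--         visits[earlier] += 1
--         if (later != n):
--             visits[later+1] -= 1
--
--     #Find most visited point
--     most = 1
--     prev = 0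
--     for i in range(1, len(visits)):
--         visits[i] += prev
--         prev = visits[i]
--         #Check against most
--         if visits[i] > visits[most]:
--             most = i
--
--     return most
-- ===== SOURCE B (Python) =====
-- def getMostVisited(n, sprints):
--     if len(sprints) == 1:
--         return sprints[0]
--     counts = [0] * (n + 1)
--     for left, right in zip(sprints, sprints[1:]):
--         lo, hi = (left, right) if left <= right else (right, left)
--         for p in range(lo, hi + 1):
--             counts[p] += 1
--     best = 1
--     for i in range(2, len(counts)):
--         if counts[i] > counts[best]:
--             best = i
--     return best
-- ===== Notes on version B (the rewrite author's own statement) =====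
-- stated objective: simpler
-- what changed: B replaces A's difference-array with in-place prefix-sum-and-argmax pass by direct per-point counting: for each adjacent sprint pair it increments a counter for every point in the inclusive interval, then a plain argmax scan (smallest index on ties) over the counts; A's O(n+m) is traded for a shorter, more obvious O(n*m) loop.
-- outside the precondition, e.g. on getMostVisited(3, [-2, -2]): A returns 2, B returns 2; on getMostVisited(3, [5, 1]): A raises IndexError, B raises IndexError
import Mathlib
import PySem

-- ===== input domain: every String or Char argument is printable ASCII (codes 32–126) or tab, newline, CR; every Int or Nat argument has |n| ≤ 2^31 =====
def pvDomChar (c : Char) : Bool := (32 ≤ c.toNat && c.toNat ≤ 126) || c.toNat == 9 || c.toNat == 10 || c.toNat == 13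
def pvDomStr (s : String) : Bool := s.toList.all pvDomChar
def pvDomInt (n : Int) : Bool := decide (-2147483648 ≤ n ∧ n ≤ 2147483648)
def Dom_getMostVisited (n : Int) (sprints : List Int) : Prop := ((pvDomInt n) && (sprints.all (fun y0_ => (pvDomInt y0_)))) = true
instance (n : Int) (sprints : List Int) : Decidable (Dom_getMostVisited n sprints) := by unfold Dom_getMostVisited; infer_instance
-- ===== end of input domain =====

-- B replaces A's difference-array + in-place prefix-sum/argmax pass by direct per-point interval
-- counting followed by a plain argmax scan: simpler, at the cost of O(n*m) instead of O(n+m).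


-- ===== PORT A =====
-- Array mirrors of Python list indexing/assignment (exact PySem index semantics, O(1) access):
-- aGetD a i d = a[i] with default d, aSetD a i v = a with a[i] = v (out of range: unchanged).
def aGetD (a : Array Int) (i : Int) (d : Int) : Int :=
  match PySem.List.pyIdx? a.size i with
  | some k => a.getD k d
  | none => d

def aSetD (a : Array Int) (i : Int) (v : Int) : Array Int :=
  match PySem.List.pyIdx? a.size i with
  | some k => a.setIfInBounds k v
  | none => a

def getMostVisited (n : Int) (sprints : List Int) : Int :=
  if sprints.length == 1 then PySem.List.pyGetD sprints 0 0
  else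
    let visits0 : Array Int := Array.replicate (n + 1).toNat (0 : Int)
    let visits1 := (PySem.List.pyRange 1 (sprints.length : Int) 1).foldl (fun visits i =>
      let earlier := min (PySem.List.pyGetD sprints (i - 1) 0) (PySem.List.pyGetD sprints i 0)
      let later := max (PySem.List.pyGetD sprints (i - 1) 0) (PySem.List.pyGetD sprints i 0)
      let visits := aSetD visits earlier (aGetD visits earlier 0 + 1)
      if later ≠ n then
        aSetD visits (later + 1) (aGetD visits (later + 1) 0 - 1)
      else visits) visits0
    let fin := (PySem.List.pyRange 1 (visits1.size : Int) 1).foldl (fun st i =>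
      let v := aGetD st.1 i 0 + st.2.2
      let visits := aSetD st.1 i v
      let most := if v > aGetD visits st.2.1 0 then i else st.2.1
      (visits, most, v)) (visits1, (1 : Int), (0 : Int))
    fin.2.1

-- ===== PORT B =====
def getMostVisited_alt (n : Int) (sprints : List Int) : Int :=
  if sprints.length == 1 then PySem.List.pyGetD sprints 0 0
  else
    let counts0 : Array Int := Array.replicate (n + 1).toNat (0 : Int)
    let counts := (sprints.zip (PySem.List.slice sprints (some 1) none)).foldl (fun counts pr =>
      let lo := if pr.1 ≤ pr.2 then pr.1 else pr.2
      let hi := if pr.1 ≤ pr.2 then pr.2 else pr.1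
      (PySem.List.pyRange lo (hi + 1) 1).foldl (fun counts p =>
        aSetD counts p (aGetD counts p 0 + 1)) counts) counts0
    (PySem.List.pyRange 2 (counts.size : Int) 1).foldl (fun best i =>
      if aGetD counts i 0 > aGetD counts best 0 then i else best) (1 : Int)

-- ===== PRECONDITION & SPEC =====
-- Pre_ restricts to the problem's natural domain (sprint points 1..n, or a single sprint):
-- outside it A usually raises IndexError, and where it still returns the value arises from
-- Python's negative-index wraparound, which this claim does not model.
def Pre_getMostVisited (n : Int) (sprints : List Int) : Prop :=
  sprints.length = 1 ∨ (1 ≤ n ∧ ∀ x ∈ sprints, 1 ≤ x ∧ x ≤ n)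
instance (n : Int) (sprints : List Int) : Decidable (Pre_getMostVisited n sprints) := by
  unfold Pre_getMostVisited; infer_instance

def pvWitness_getMostVisited : Int × List Int := (3, [1, 3, 2])

def Spec_getMostVisited (n : Int) (sprints : List Int) (out : Int) : Prop := out = getMostVisited_alt n sprints
instance (n : Int) (sprints : List Int) (out : Int) : Decidable (Spec_getMostVisited n sprints out) := by unfold Spec_getMostVisited; infer_instance

-- ===== CLAIM (what is proved, stated in full; the proofs are below) =====
def Claim_equal_getMostVisited : Prop := ∀ (n : Int) (sprints : List Int), Dom_getMostVisited n sprints → Pre_getMostVisited n sprints → Spec_getMostVisited n sprints (getMostVisited n sprints)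


-- ===== LEMMAS AND PROOFS =====

-- proof-only helpers: list-level versions of the two ports, and Array ↔ List bridges
def gmvList (n : Int) (sprints : List Int) : Int :=
  if sprints.length == 1 then PySem.List.pyGetD sprints 0 0
  else
    let visits0 : List Int := List.replicate (n + 1).toNat (0 : Int)
    let visits1 := (PySem.List.pyRange 1 (sprints.length : Int) 1).foldl (fun visits i =>
      let earlier := min (PySem.List.pyGetD sprints (i - 1) 0) (PySem.List.pyGetD sprints i 0)
      let later := max (PySem.List.pyGetD sprints (i - 1) 0) (PySem.List.pyGetD sprints i 0)
      let visits := PySem.List.pySetD visits earlier (PySem.List.pyGetD visits earlier 0 + 1)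
      if later ≠ n then
        PySem.List.pySetD visits (later + 1) (PySem.List.pyGetD visits (later + 1) 0 - 1)
      else visits) visits0
    let fin := (PySem.List.pyRange 1 (visits1.length : Int) 1).foldl (fun st i =>
      let v := PySem.List.pyGetD st.1 i 0 + st.2.2
      let visits := PySem.List.pySetD st.1 i v
      let most := if v > PySem.List.pyGetD visits st.2.1 0 then i else st.2.1
      (visits, most, v)) (visits1, (1 : Int), (0 : Int))
    fin.2.1

def gmvAltList (n : Int) (sprints : List Int) : Int :=
  if sprints.length == 1 then PySem.List.pyGetD sprints 0 0
  else
    let counts0 : List Int := List.replicate (n + 1).toNat (0 : Int)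
    let counts := (sprints.zip (PySem.List.slice sprints (some 1) none)).foldl (fun counts pr =>
      let lo := if pr.1 ≤ pr.2 then pr.1 else pr.2
      let hi := if pr.1 ≤ pr.2 then pr.2 else pr.1
      (PySem.List.pyRange lo (hi + 1) 1).foldl (fun counts p =>
        PySem.List.pySetD counts p (PySem.List.pyGetD counts p 0 + 1)) counts) counts0
    (PySem.List.pyRange 2 (counts.length : Int) 1).foldl (fun best i =>
      if PySem.List.pyGetD counts i 0 > PySem.List.pyGetD counts best 0 then i else best) (1 : Int)

lemma aGetD_eq (a : Array Int) (i d : Int) : aGetD a i d = PySem.List.pyGetD a.toList i d := by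
  unfold aGetD PySem.List.pyGetD PySem.List.pyGet?
  rw [Array.length_toList]
  rcases h : PySem.List.pyIdx? a.size i with _ | k
  · rfl
  · simp only [Option.bind_some, Option.getD]
    have hk : k < a.size := by
      unfold PySem.List.pyIdx? at h
      split_ifs at h <;> simp_all <;> omega
    rw [Array.getD, dif_pos hk]
    simp [List.getElem?_eq_getElem (show k < a.toList.length by rw [Array.length_toList]; exact hk)]

lemma aSetD_toList (a : Array Int) (i v : Int) :
    (aSetD a i v).toList = PySem.List.pySetD a.toList i v := by
  unfold aSetD PySem.List.pySetD PySem.List.pySet?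
  rw [Array.length_toList]
  rcases h : PySem.List.pyIdx? a.size i with _ | k
  · rfl
  · simp [Array.toList_setIfInBounds]

lemma portA_eq_list (n : Int) (sprints : List Int) :
    getMostVisited n sprints = gmvList n sprints := by
  unfold getMostVisited gmvList
  by_cases h : sprints.length = 1
  · rw [if_pos (by simp [h]), if_pos (by simp [h])]
  · rw [if_neg (by simp [h]), if_neg (by simp [h])]
    simp only []
    have hcomm1 : ∀ (x : Array Int) (y : Int),
        (fun visits i =>
          let earlier := min (PySem.List.pyGetD sprints (i - 1) 0) (PySem.List.pyGetD sprints i 0)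
          let later := max (PySem.List.pyGetD sprints (i - 1) 0) (PySem.List.pyGetD sprints i 0)
          let visits := PySem.List.pySetD visits earlier (PySem.List.pyGetD visits earlier 0 + 1)
          if later ≠ n then
            PySem.List.pySetD visits (later + 1) (PySem.List.pyGetD visits (later + 1) 0 - 1)
          else visits) x.toList y
        = (Array.toList) ((fun visits i =>
          let earlier := min (PySem.List.pyGetD sprints (i - 1) 0) (PySem.List.pyGetD sprints i 0)
          let later := max (PySem.List.pyGetD sprints (i - 1) 0) (PySem.List.pyGetD sprints i 0)
          let visits := aSetD visits earlier (aGetD visits earlier 0 + 1)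
          if later ≠ n then
            aSetD visits (later + 1) (aGetD visits (later + 1) 0 - 1)
          else visits) x y) := by
      intro x y
      simp only []
      split_ifs <;> simp [aSetD_toList, aGetD_eq]
    have hV1 := List.foldl_hom (Array.toList)
      (g₂ := (fun visits i =>
          let earlier := min (PySem.List.pyGetD sprints (i - 1) 0) (PySem.List.pyGetD sprints i 0)
          let later := max (PySem.List.pyGetD sprints (i - 1) 0) (PySem.List.pyGetD sprints i 0)
          let visits := PySem.List.pySetD visits earlier (PySem.List.pyGetD visits earlier 0 + 1)
          if later ≠ n then
            PySem.List.pySetD visits (later + 1) (PySem.List.pyGetD visits (later + 1) 0 - 1)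
          else visits))
      (g₁ := (fun visits i =>
          let earlier := min (PySem.List.pyGetD sprints (i - 1) 0) (PySem.List.pyGetD sprints i 0)
          let later := max (PySem.List.pyGetD sprints (i - 1) 0) (PySem.List.pyGetD sprints i 0)
          let visits := aSetD visits earlier (aGetD visits earlier 0 + 1)
          if later ≠ n then
            aSetD visits (later + 1) (aGetD visits (later + 1) 0 - 1)
          else visits))
      (l := PySem.List.pyRange 1 (sprints.length : Int) 1)
      (init := Array.replicate (n + 1).toNat (0 : Int)) hcomm1
    rw [Array.toList_replicate] at hV1
    have hcomm2 : ∀ (st : Array Int × Int × Int) (y : Int),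
        (fun (st : List Int × Int × Int) i =>
          let v := PySem.List.pyGetD st.1 i 0 + st.2.2
          let visits := PySem.List.pySetD st.1 i v
          let most := if v > PySem.List.pyGetD visits st.2.1 0 then i else st.2.1
          (visits, most, v)) ((fun st => (st.1.toList, st.2.1, st.2.2)) st) y
        = (fun (st : Array Int × Int × Int) => (st.1.toList, st.2.1, st.2.2)) ((fun st i =>
          let v := aGetD st.1 i 0 + st.2.2
          let visits := aSetD st.1 i v
          let most := if v > aGetD visits st.2.1 0 then i else st.2.1
          (visits, most, v)) st y) := by
      intro st y
      simp [aSetD_toList, aGetD_eq]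
    have hV2 := List.foldl_hom (fun (st : Array Int × Int × Int) => (st.1.toList, st.2.1, st.2.2))
      (g₂ := (fun (st : List Int × Int × Int) i =>
          let v := PySem.List.pyGetD st.1 i 0 + st.2.2
          let visits := PySem.List.pySetD st.1 i v
          let most := if v > PySem.List.pyGetD visits st.2.1 0 then i else st.2.1
          (visits, most, v)))
      (g₁ := (fun (st : Array Int × Int × Int) i =>
          let v := aGetD st.1 i 0 + st.2.2
          let visits := aSetD st.1 i v
          let most := if v > aGetD visits st.2.1 0 then i else st.2.1
          (visits, most, v)))
      (l := PySem.List.pyRange 1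
        (((PySem.List.pyRange 1 (sprints.length : Int) 1).foldl (fun visits i =>
          let earlier := min (PySem.List.pyGetD sprints (i - 1) 0) (PySem.List.pyGetD sprints i 0)
          let later := max (PySem.List.pyGetD sprints (i - 1) 0) (PySem.List.pyGetD sprints i 0)
          let visits := aSetD visits earlier (aGetD visits earlier 0 + 1)
          if later ≠ n then
            aSetD visits (later + 1) (aGetD visits (later + 1) 0 - 1)
          else visits) (Array.replicate (n + 1).toNat (0 : Int))).toList.length : Int) 1)
      (init := ((PySem.List.pyRange 1 (sprints.length : Int) 1).foldl (fun visits i =>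
          let earlier := min (PySem.List.pyGetD sprints (i - 1) 0) (PySem.List.pyGetD sprints i 0)
          let later := max (PySem.List.pyGetD sprints (i - 1) 0) (PySem.List.pyGetD sprints i 0)
          let visits := aSetD visits earlier (aGetD visits earlier 0 + 1)
          if later ≠ n then
            aSetD visits (later + 1) (aGetD visits (later + 1) 0 - 1)
          else visits) (Array.replicate (n + 1).toNat (0 : Int)), (1 : Int), (0 : Int)))
      hcomm2
    have hsz : ∀ (a : Array Int), (a.size : Int) = (a.toList.length : Int) := by
      intro a; rw [Array.length_toList]
    have hV2' := congrArg (fun p : List Int × Int × Int => p.2.1) hV2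
    simp only [] at hV2'
    rw [hsz]
    rw [← hV2']
    rw [hV1]

lemma portB_eq_list (n : Int) (sprints : List Int) :
    getMostVisited_alt n sprints = gmvAltList n sprints := by
  unfold getMostVisited_alt gmvAltList
  by_cases h : sprints.length = 1
  · rw [if_pos (by simp [h]), if_pos (by simp [h])]
  · rw [if_neg (by simp [h]), if_neg (by simp [h])]
    simp only []
    have hinner : ∀ (lo hi : Int) (x : Array Int),
        (PySem.List.pyRange lo (hi + 1) 1).foldl (fun counts p =>
          PySem.List.pySetD counts p (PySem.List.pyGetD counts p 0 + 1)) x.toList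
        = ((PySem.List.pyRange lo (hi + 1) 1).foldl (fun counts p =>
          aSetD counts p (aGetD counts p 0 + 1)) x).toList := by
      intro lo hi x
      exact List.foldl_hom (Array.toList)
        (g₂ := fun counts p => PySem.List.pySetD counts p (PySem.List.pyGetD counts p 0 + 1))
        (g₁ := fun counts p => aSetD counts p (aGetD counts p 0 + 1))
        (fun c p => by simp [aSetD_toList, aGetD_eq])
    have hcomm3 : ∀ (x : Array Int) (pr : Int × Int),
        (fun counts (pr : Int × Int) =>
          let lo := if pr.1 ≤ pr.2 then pr.1 else pr.2
          let hi := if pr.1 ≤ pr.2 then pr.2 else pr.1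
          (PySem.List.pyRange lo (hi + 1) 1).foldl (fun counts p =>
            PySem.List.pySetD counts p (PySem.List.pyGetD counts p 0 + 1)) counts) x.toList pr
        = (Array.toList) ((fun counts (pr : Int × Int) =>
          let lo := if pr.1 ≤ pr.2 then pr.1 else pr.2
          let hi := if pr.1 ≤ pr.2 then pr.2 else pr.1
          (PySem.List.pyRange lo (hi + 1) 1).foldl (fun counts p =>
            aSetD counts p (aGetD counts p 0 + 1)) counts) x pr) := by
      intro x pr
      simp only []
      exact hinner _ _ x
    have hC := List.foldl_hom (Array.toList)
      (g₂ := (fun counts (pr : Int × Int) =>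
          let lo := if pr.1 ≤ pr.2 then pr.1 else pr.2
          let hi := if pr.1 ≤ pr.2 then pr.2 else pr.1
          (PySem.List.pyRange lo (hi + 1) 1).foldl (fun counts p =>
            PySem.List.pySetD counts p (PySem.List.pyGetD counts p 0 + 1)) counts))
      (g₁ := (fun counts (pr : Int × Int) =>
          let lo := if pr.1 ≤ pr.2 then pr.1 else pr.2
          let hi := if pr.1 ≤ pr.2 then pr.2 else pr.1
          (PySem.List.pyRange lo (hi + 1) 1).foldl (fun counts p =>
            aSetD counts p (aGetD counts p 0 + 1)) counts))
      (l := sprints.zip (PySem.List.slice sprints (some 1) none))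
      (init := Array.replicate (n + 1).toNat (0 : Int)) hcomm3
    rw [Array.toList_replicate] at hC
    have hscan : ∀ (C : Array Int),
        (PySem.List.pyRange 2 (C.size : Int) 1).foldl (fun best i =>
          if aGetD C i 0 > aGetD C best 0 then i else best) (1 : Int)
        = (PySem.List.pyRange 2 (C.toList.length : Int) 1).foldl (fun best i =>
          if PySem.List.pyGetD C.toList i 0 > PySem.List.pyGetD C.toList best 0 then i else best) (1 : Int) := by
      intro C
      rw [show (C.size : Int) = (C.toList.length : Int) from by rw [Array.length_toList]]
      have hfun : (fun (best i : Int) =>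
          if aGetD C i 0 > aGetD C best 0 then i else best)
          = (fun (best i : Int) =>
          if PySem.List.pyGetD C.toList i 0 > PySem.List.pyGetD C.toList best 0 then i else best) := by
        funext best i
        rw [aGetD_eq, aGetD_eq]
      rw [hfun]
    rw [hscan, hC]


lemma gset (vs : List Int) (i j v : Int) (h0 : 0 ≤ i) (h1 : i < (vs.length : Int)) (hj : 0 ≤ j) :
    PySem.List.pyGetD (PySem.List.pySetD vs i v) j 0 = if j = i then v else PySem.List.pyGetD vs j 0 := by
  rw [PySem.List.pySetD_of_nonneg vs v h0]
  rw [← Int.toNat_of_nonneg hj, ← Int.toNat_of_nonneg h0]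
  rw [PySem.List.pyGetD_natCast, PySem.List.pyGetD_natCast]
  rw [List.getD_eq_getElem?_getD, List.getD_eq_getElem?_getD, List.getElem?_set]
  split_ifs with h2 h3 h4 h5 <;> simp_all
  omega

lemma grep0 (m : Nat) (j : Int) (hj : 0 ≤ j) : PySem.List.pyGetD (List.replicate m (0 : Int)) j 0 = 0 := by
  rw [← Int.toNat_of_nonneg hj, PySem.List.pyGetD_natCast, List.getD_eq_getElem?_getD]
  rcases h : (List.replicate m (0:Int))[j.toNat]? with _ | x
  · rfl
  · have hx := List.mem_of_getElem? h
    simp at hx; simp [hx]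

lemma adjPairs (s : List Int) :
    (PySem.List.pyRange 1 (s.length : Int) 1).map
      (fun i => (PySem.List.pyGetD s (i - 1) 0, PySem.List.pyGetD s i 0)) = s.zip (s.drop 1) := by
  apply List.ext_getElem
  · simp [PySem.List.length_pyRange_one]
  · intro k h1 h2
    simp only [List.getElem_map, PySem.List.getElem_pyRange_one, List.getElem_zip, List.getElem_drop]
    have hlen : 1 + k < s.length := by
      simp [PySem.List.length_pyRange_one] at h1; omega
    have e1 : (1 : Int) + (k : Int) - 1 = ((k : Nat) : Int) := by omega
    have e2 : (1 : Int) + (k : Int) = (((1 + k : Nat)) : Int) := by omega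
    rw [e1, e2, PySem.List.pyGetD_natCast, PySem.List.pyGetD_natCast]
    have g1 : s.getD k 0 = s[k] := List.getD_eq_getElem s 0 (by omega)
    have g2 : s.getD (1+k) 0 = s[1+k] := List.getD_eq_getElem s 0 hlen
    rw [g1, g2]

lemma incrLoop (k : Nat) : ∀ (lo b : Int) (cs : List Int), lo + k = b → 0 ≤ lo → b ≤ (cs.length : Int) →
    ((PySem.List.pyRange lo b 1).foldl (fun c p => PySem.List.pySetD c p (PySem.List.pyGetD c p 0 + 1)) cs).length = cs.length ∧
    ∀ j : Int, 0 ≤ j →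
      PySem.List.pyGetD ((PySem.List.pyRange lo b 1).foldl (fun c p => PySem.List.pySetD c p (PySem.List.pyGetD c p 0 + 1)) cs) j 0
        = PySem.List.pyGetD cs j 0 + (if lo ≤ j ∧ j < b then 1 else 0) := by
  induction k with
  | zero =>
    intro lo b cs hb h0 hlen
    rw [PySem.List.pyRange_one_eq_nil (by omega)]
    simp only [List.foldl_nil]
    refine ⟨by simp, fun j hj => ?_⟩
    rw [if_neg (by omega)]
    omega
  | succ k ih =>
    intro lo b cs hb h0 hlen
    rw [PySem.List.pyRange_one_cons (by omega)]
    simp only [List.foldl_cons]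
    set cs' := PySem.List.pySetD cs lo (PySem.List.pyGetD cs lo 0 + 1) with hcs'
    have hlen' : cs'.length = cs.length := PySem.List.length_pySetD cs lo _
    have hib : (lo + 1) + (k : Int) = b := by push_cast at hb ⊢; omega
    obtain ⟨ihlen, ihget⟩ := ih (lo + 1) b cs' hib (by omega) (by omega)
    refine ⟨by rw [ihlen, hlen'], fun j hj => ?_⟩
    rw [ihget j hj, hcs', gset cs lo j _ h0 (by omega) hj]
    split_ifs <;> (try subst_vars) <;> omega

def pvCnt (ps : List (Int × Int)) (i : Int) : Int :=
  (ps.countP (fun pr => decide (min pr.1 pr.2 ≤ i ∧ i ≤ max pr.1 pr.2)) : Int)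
def pvS (n : Int) (ps : List (Int × Int)) (i : Int) : Int :=
  (ps.countP (fun pr => decide (min pr.1 pr.2 ≤ i)) : Int)
    - (ps.countP (fun pr => decide (max pr.1 pr.2 ≠ n ∧ max pr.1 pr.2 + 1 ≤ i)) : Int)
def pvD (n : Int) (ps : List (Int × Int)) (i : Int) : Int :=
  (ps.countP (fun pr => decide (min pr.1 pr.2 = i)) : Int)
    - (ps.countP (fun pr => decide (max pr.1 pr.2 ≠ n ∧ max pr.1 pr.2 + 1 = i)) : Int)

lemma pvS_zero (n : Int) (ps : List (Int × Int)) (h : ∀ pr ∈ ps, 1 ≤ min pr.1 pr.2) :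
    pvS n ps 0 = 0 := by
  unfold pvS
  rw [List.countP_eq_zero.2, List.countP_eq_zero.2]
  · simp
  · intro pr hpr
    have := h pr hpr
    have hmm : min pr.1 pr.2 ≤ max pr.1 pr.2 := min_le_max
    simp only [decide_eq_true_eq, not_and]
    intro _
    omega
  · intro pr hpr
    have := h pr hpr
    simp only [decide_eq_true_eq]
    omega

lemma pvS_rec (n : Int) (ps : List (Int × Int)) (i : Int) :
    pvS n ps i = pvS n ps (i - 1) + pvD n ps i := by
  induction ps with
  | nil => simp [pvS, pvD]
  | cons pr t ih =>
    unfold pvS pvD at *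
    simp only [List.countP_cons]
    push_cast
    split_ifs <;> (try simp only [decide_eq_true_eq, not_and] at *) <;> omega

lemma pvS_eq_cnt (n : Int) (ps : List (Int × Int)) (i : Int)
    (hb : ∀ pr ∈ ps, max pr.1 pr.2 ≤ n) (hi : i ≤ n) :
    pvS n ps i = pvCnt ps i := by
  induction ps with
  | nil => simp [pvS, pvCnt]
  | cons pr t ih =>
    have hbt : ∀ q ∈ t, max q.1 q.2 ≤ n := fun q hq => hb q (List.mem_cons_of_mem _ hq)
    have hpr := hb pr List.mem_cons_self
    have hmm : min pr.1 pr.2 ≤ max pr.1 pr.2 := min_le_max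
    have ih2 := ih hbt
    unfold pvS pvCnt at *
    simp only [List.countP_cons]
    push_cast
    split_ifs <;> (try simp only [decide_eq_true_eq, not_and] at *) <;> omega

lemma countsLoop (ps : List (Int × Int)) : ∀ (cs : List Int),
    (∀ pr ∈ ps, 1 ≤ min pr.1 pr.2 ∧ max pr.1 pr.2 < (cs.length : Int)) →
    (ps.foldl (fun counts pr =>
        let lo := if pr.1 ≤ pr.2 then pr.1 else pr.2
        let hi := if pr.1 ≤ pr.2 then pr.2 else pr.1
        (PySem.List.pyRange lo (hi + 1) 1).foldl (fun counts p =>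
          PySem.List.pySetD counts p (PySem.List.pyGetD counts p 0 + 1)) counts) cs).length = cs.length ∧
    ∀ j : Int, 0 ≤ j →
      PySem.List.pyGetD (ps.foldl (fun counts pr =>
        let lo := if pr.1 ≤ pr.2 then pr.1 else pr.2
        let hi := if pr.1 ≤ pr.2 then pr.2 else pr.1
        (PySem.List.pyRange lo (hi + 1) 1).foldl (fun counts p =>
          PySem.List.pySetD counts p (PySem.List.pyGetD counts p 0 + 1)) counts) cs) j 0
        = PySem.List.pyGetD cs j 0 + pvCnt ps j := by
  induction ps with
  | nil => intro cs _; exact ⟨rfl, fun j _ => by simp [pvCnt]⟩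
  | cons pr t ih =>
    intro cs hb
    obtain ⟨h1, h2⟩ := hb pr List.mem_cons_self
    have hbt : ∀ q ∈ t, 1 ≤ min q.1 q.2 ∧ max q.1 q.2 < (cs.length : Int) :=
      fun q hq => hb q (List.mem_cons_of_mem _ hq)
    simp only [List.foldl_cons]
    have hlo : (if pr.1 ≤ pr.2 then pr.1 else pr.2) = min pr.1 pr.2 := (min_def pr.1 pr.2).symm
    have hhi : (if pr.1 ≤ pr.2 then pr.2 else pr.1) = max pr.1 pr.2 := (max_def pr.1 pr.2).symm
    rw [hlo, hhi]
    set lo := min pr.1 pr.2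
    set hi := max pr.1 pr.2
    have hmm : lo ≤ hi := min_le_max
    obtain ⟨ilen, iget⟩ := incrLoop (hi + 1 - lo).toNat lo (hi + 1) cs (by omega) (by omega) (by omega)
    obtain ⟨tlen, tget⟩ := ih _ (by rw [ilen]; exact hbt)
    refine ⟨by rw [tlen, ilen], fun j hj => ?_⟩
    rw [tget j hj, iget j hj]
    have : pvCnt (pr :: t) j = pvCnt t j + (if lo ≤ j ∧ j < hi + 1 then 1 else 0) := by
      unfold pvCnt
      simp only [List.countP_cons]
      push_cast
      split_ifs <;> (try simp only [decide_eq_true_eq, not_and] at *) <;> omega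
    omega

lemma visitsLoop (n : Int) (ps : List (Int × Int)) : ∀ (vs : List Int),
    (∀ pr ∈ ps, 1 ≤ min pr.1 pr.2 ∧ max pr.1 pr.2 ≤ n) → (vs.length : Int) = n + 1 →
    (ps.foldl (fun visits pr =>
        let earlier := min pr.1 pr.2
        let later := max pr.1 pr.2
        let visits := PySem.List.pySetD visits earlier (PySem.List.pyGetD visits earlier 0 + 1)
        if later ≠ n then
          PySem.List.pySetD visits (later + 1) (PySem.List.pyGetD visits (later + 1) 0 - 1)
        else visits) vs).length = vs.length ∧
    ∀ j : Int, 0 ≤ j →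
      PySem.List.pyGetD (ps.foldl (fun visits pr =>
        let earlier := min pr.1 pr.2
        let later := max pr.1 pr.2
        let visits := PySem.List.pySetD visits earlier (PySem.List.pyGetD visits earlier 0 + 1)
        if later ≠ n then
          PySem.List.pySetD visits (later + 1) (PySem.List.pyGetD visits (later + 1) 0 - 1)
        else visits) vs) j 0
        = PySem.List.pyGetD vs j 0 + pvD n ps j := by
  induction ps with
  | nil => intro vs _ _; exact ⟨rfl, fun j _ => by simp [pvD]⟩
  | cons pr t ih =>
    intro vs hb hlen
    obtain ⟨h1, h2⟩ := hb pr List.mem_cons_self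
    have hbt : ∀ q ∈ t, 1 ≤ min q.1 q.2 ∧ max q.1 q.2 ≤ n :=
      fun q hq => hb q (List.mem_cons_of_mem _ hq)
    have hmm : min pr.1 pr.2 ≤ max pr.1 pr.2 := min_le_max
    simp only [List.foldl_cons]
    set e := min pr.1 pr.2 with he
    set l := max pr.1 pr.2 with hl
    set vs1 := PySem.List.pySetD vs e (PySem.List.pyGetD vs e 0 + 1) with hvs1
    have hlen1 : vs1.length = vs.length := PySem.List.length_pySetD vs e _
    set vs2 := if l ≠ n then PySem.List.pySetD vs1 (l + 1) (PySem.List.pyGetD vs1 (l + 1) 0 - 1) else vs1 with hvs2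
    have hlen2 : vs2.length = vs.length := by
      rw [hvs2]; split_ifs <;> simp [PySem.List.length_pySetD, hlen1]
    have g1 : ∀ j : Int, 0 ≤ j → PySem.List.pyGetD vs1 j 0
        = if j = e then PySem.List.pyGetD vs e 0 + 1 else PySem.List.pyGetD vs j 0 := by
      intro j hj
      rw [hvs1, gset vs e j _ (by omega) (by omega) hj]
    have hget2 : ∀ j : Int, 0 ≤ j → PySem.List.pyGetD vs2 j 0
        = PySem.List.pyGetD vs j 0 + (if e = j then 1 else 0)
          - (if l ≠ n ∧ l + 1 = j then 1 else 0) := by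
      intro j hj
      by_cases hn : l ≠ n
      · have hv2 : vs2 = PySem.List.pySetD vs1 (l + 1) (PySem.List.pyGetD vs1 (l + 1) 0 - 1) := by
          rw [hvs2, if_pos hn]
        rw [hv2, gset vs1 (l + 1) j _ (by omega) (by rw [hlen1]; omega) hj,
          g1 j hj, g1 (l + 1) (by omega)]
        split_ifs <;> (try subst_vars) <;> omega
      · have hv2 : vs2 = vs1 := by rw [hvs2, if_neg hn]
        rw [hv2, g1 j hj]
        split_ifs <;> (try subst_vars) <;> omega
    obtain ⟨tlen, tget⟩ := ih vs2 hbt (by rw [hlen2]; exact hlen)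
    refine ⟨by rw [tlen, hlen2], fun j hj => ?_⟩
    rw [tget j hj, hget2 j hj]
    have : pvD n (pr :: t) j = pvD n t j + (if e = j then 1 else 0) - (if l ≠ n ∧ l + 1 = j then 1 else 0) := by
      unfold pvD
      simp only [List.countP_cons]
      push_cast
      rw [← he, ← hl]
      split_ifs <;> (try simp only [decide_eq_true_eq, not_and] at *) <;> omega
    omega

lemma scanCongr (f g : Int → Int) (k : Nat) : ∀ (a b best : Int), a + k = b →
    (∀ i, a ≤ i → i < b → g i = f i) → g best = f best →
    (PySem.List.pyRange a b 1).foldl (fun bst i => if g i > g bst then i else bst) best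
      = (PySem.List.pyRange a b 1).foldl (fun bst i => if f i > f bst then i else bst) best := by
  induction k with
  | zero =>
    intro a b best hab _ _
    rw [PySem.List.pyRange_one_eq_nil (by omega)]
    simp
  | succ k ih =>
    intro a b best hab hmem hbest
    rw [PySem.List.pyRange_one_cons (by omega)]
    simp only [List.foldl_cons]
    have hga : g a = f a := hmem a le_rfl (by omega)
    by_cases hc : f a > f best
    · rw [if_pos (show g a > g best by rw [hga, hbest]; exact hc), if_pos hc]
      exact ih (a + 1) b a (by push_cast at hab ⊢; omega)
        (fun i h1 h2 => hmem i (by omega) h2) hga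
    · rw [if_neg (show ¬ g a > g best by rw [hga, hbest]; exact hc), if_neg hc]
      exact ih (a + 1) b best (by push_cast at hab ⊢; omega)
        (fun i h1 h2 => hmem i (by omega) h2) hbest

lemma scanA (n : Int) (ps : List (Int × Int)) (k : Nat) : ∀ (a L : Int) (vs : List Int) (most prev : Int),
    1 ≤ a → a + k = L → (vs.length : Int) = L →
    prev = pvS n ps (a - 1) → 0 ≤ most →
    PySem.List.pyGetD vs most 0 = pvS n ps most →
    (∀ j : Int, a ≤ j → j < L → PySem.List.pyGetD vs j 0 = pvD n ps j) →
    ((PySem.List.pyRange a L 1).foldl (fun st i =>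
        let v := PySem.List.pyGetD st.1 i 0 + st.2.2
        let visits := PySem.List.pySetD st.1 i v
        let most := if v > PySem.List.pyGetD visits st.2.1 0 then i else st.2.1
        (visits, most, v)) ((vs, most, prev) : List Int × Int × Int)).2.1
      = (PySem.List.pyRange a L 1).foldl (fun bst i => if pvS n ps i > pvS n ps bst then i else bst) most := by
  induction k with
  | zero =>
    intro a L vs most prev _ hab _ _ _ _ _
    rw [PySem.List.pyRange_one_eq_nil (by omega)]
    simp
  | succ k ih =>
    intro a L vs most prev ha hab hlen hprev hm0 hvsmost hup
    rw [PySem.List.pyRange_one_cons (by omega)]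
    simp only [List.foldl_cons]
    have hva : PySem.List.pyGetD vs a 0 + prev = pvS n ps a := by
      rw [hup a le_rfl (by omega), hprev]
      have := pvS_rec n ps a
      omega
    set vs' := PySem.List.pySetD vs a (PySem.List.pyGetD vs a 0 + prev) with hvs'
    have hlen' : (vs'.length : Int) = L := by rw [hvs', PySem.List.length_pySetD]; exact hlen
    have hgm : PySem.List.pyGetD vs' most 0 = pvS n ps most := by
      rw [hvs', gset vs a most _ (by omega) (by omega) hm0]
      split_ifs with hma
      · rw [hva, hma]
      · exact hvsmost
    by_cases hc : pvS n ps a > pvS n ps most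
    · rw [if_pos (show PySem.List.pyGetD vs a 0 + prev > PySem.List.pyGetD vs' most 0 by
          rw [hva, hgm]; exact hc), if_pos hc]
      exact ih (a + 1) L vs' a (PySem.List.pyGetD vs a 0 + prev) (by omega) (by push_cast at hab ⊢; omega) hlen'
        (by rw [show a + 1 - 1 = a by ring]; exact hva) (by omega)
        (by rw [hvs', gset vs a a _ (by omega) (by omega) (by omega), if_pos rfl, hva])
        (fun j h1 h2 => by
          rw [hvs', gset vs a j _ (by omega) (by omega) (by omega), if_neg (by omega)]
          exact hup j (by omega) h2)
    · rw [if_neg (show ¬ PySem.List.pyGetD vs a 0 + prev > PySem.List.pyGetD vs' most 0 by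
          rw [hva, hgm]; exact hc), if_neg hc]
      exact ih (a + 1) L vs' most (PySem.List.pyGetD vs a 0 + prev) (by omega) (by push_cast at hab ⊢; omega) hlen'
        (by rw [show a + 1 - 1 = a by ring]; exact hva) hm0 hgm
        (fun j h1 h2 => by
          rw [hvs', gset vs a j _ (by omega) (by omega) (by omega), if_neg (by omega)]
          exact hup j (by omega) h2)


-- ===== VERDICT (by name: the statement is the Claim_ definition above) =====
theorem getMostVisited_spec : Claim_equal_getMostVisited := by
  unfold Claim_equal_getMostVisited Spec_getMostVisited
  intro n s _ hpre
  rw [portA_eq_list, portB_eq_list]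
  by_cases hlen1 : s.length = 1
  · unfold gmvList gmvAltList
    rw [if_pos (by simp [hlen1]), if_pos (by simp [hlen1])]
  · rcases hpre with h | ⟨hn, hb⟩
    · exact absurd h hlen1
    have hps : ∀ pr ∈ s.zip (s.drop 1), 1 ≤ min pr.1 pr.2 ∧ max pr.1 pr.2 ≤ n := by
      rintro ⟨x, y⟩ hxy
      obtain ⟨hx, hy⟩ := List.of_mem_zip hxy
      obtain ⟨hx1, hx2⟩ := hb x hx
      obtain ⟨hy1, hy2⟩ := hb y (List.mem_of_mem_drop hy)
      exact ⟨le_min hx1 hy1, max_le hx2 hy2⟩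
    have hmin1 : ∀ pr ∈ s.zip (s.drop 1), 1 ≤ min pr.1 pr.2 := fun pr hpr => (hps pr hpr).1
    have hrepl : ((List.replicate (n + 1).toNat (0 : Int)).length : Int) = n + 1 := by
      simp; omega
    have hS0 : pvS n (s.zip (s.drop 1)) 0 = 0 := pvS_zero n _ hmin1
    have hS1 : pvS n (s.zip (s.drop 1)) 1 = pvD n (s.zip (s.drop 1)) 1 := by
      have := pvS_rec n (s.zip (s.drop 1)) 1
      simp only [show (1 : Int) - 1 = 0 by ring, hS0] at this
      omega
    unfold gmvList gmvAltList
    rw [if_neg (by simp [hlen1]), if_neg (by simp [hlen1])]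
    simp only []
    -- A: first loop over indices = loop over adjacent pairs
    have eA : (PySem.List.pyRange 1 (s.length : Int) 1).foldl (fun visits i =>
          let earlier := min (PySem.List.pyGetD s (i - 1) 0) (PySem.List.pyGetD s i 0)
          let later := max (PySem.List.pyGetD s (i - 1) 0) (PySem.List.pyGetD s i 0)
          let visits' := PySem.List.pySetD visits earlier (PySem.List.pyGetD visits earlier 0 + 1)
          if later ≠ n then
            PySem.List.pySetD visits' (later + 1) (PySem.List.pyGetD visits' (later + 1) 0 - 1)
          else visits') (List.replicate (n + 1).toNat (0 : Int))
        = (s.zip (s.drop 1)).foldl (fun visits pr =>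
          let earlier := min pr.1 pr.2
          let later := max pr.1 pr.2
          let visits' := PySem.List.pySetD visits earlier (PySem.List.pyGetD visits earlier 0 + 1)
          if later ≠ n then
            PySem.List.pySetD visits' (later + 1) (PySem.List.pyGetD visits' (later + 1) 0 - 1)
          else visits') (List.replicate (n + 1).toNat (0 : Int)) := by
      rw [← adjPairs s, List.foldl_map]
    rw [eA]
    obtain ⟨vlen, vget⟩ := visitsLoop n (s.zip (s.drop 1))
      (List.replicate (n + 1).toNat (0 : Int)) hps hrepl
    have hVlen : (((s.zip (s.drop 1)).foldl (fun visits pr =>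
          let earlier := min pr.1 pr.2
          let later := max pr.1 pr.2
          let visits' := PySem.List.pySetD visits earlier (PySem.List.pyGetD visits earlier 0 + 1)
          if later ≠ n then
            PySem.List.pySetD visits' (later + 1) (PySem.List.pyGetD visits' (later + 1) 0 - 1)
          else visits') (List.replicate (n + 1).toNat (0 : Int))).length : Int) = n + 1 := by
      rw [vlen]; exact hrepl
    have hVget : ∀ j : Int, 0 ≤ j → PySem.List.pyGetD ((s.zip (s.drop 1)).foldl (fun visits pr =>
          let earlier := min pr.1 pr.2
          let later := max pr.1 pr.2
          let visits' := PySem.List.pySetD visits earlier (PySem.List.pyGetD visits earlier 0 + 1)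
          if later ≠ n then
            PySem.List.pySetD visits' (later + 1) (PySem.List.pyGetD visits' (later + 1) 0 - 1)
          else visits') (List.replicate (n + 1).toNat (0 : Int))) j 0 = pvD n (s.zip (s.drop 1)) j := by
      intro j hj
      rw [vget j hj, grep0 _ j hj]
      ring
    rw [hVlen]
    rw [scanA n (s.zip (s.drop 1)) n.toNat 1 (n + 1) _ 1 0 le_rfl (by omega) hVlen
      (by rw [show (1 : Int) - 1 = 0 by ring]; exact hS0.symm) (by omega)
      (by rw [hVget 1 (by omega)]; exact hS1.symm)
      (fun j h1 h2 => hVget j (by omega))]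
    -- B: slice is drop, counts loop
    rw [show PySem.List.slice s (some 1) none = s.drop 1 from PySem.List.slice_from_natCast s 1]
    obtain ⟨clen, cget⟩ := countsLoop (s.zip (s.drop 1))
      (List.replicate (n + 1).toNat (0 : Int))
      (fun pr hpr => ⟨(hps pr hpr).1, by rw [hrepl]; have := (hps pr hpr).2; omega⟩)
    have hClen : (((s.zip (s.drop 1)).foldl (fun counts pr =>
          let lo := if pr.1 ≤ pr.2 then pr.1 else pr.2
          let hi := if pr.1 ≤ pr.2 then pr.2 else pr.1
          (PySem.List.pyRange lo (hi + 1) 1).foldl (fun counts p =>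
            PySem.List.pySetD counts p (PySem.List.pyGetD counts p 0 + 1)) counts)
          (List.replicate (n + 1).toNat (0 : Int))).length : Int) = n + 1 := by
      rw [clen]; exact hrepl
    have hCget : ∀ j : Int, 0 ≤ j → PySem.List.pyGetD ((s.zip (s.drop 1)).foldl (fun counts pr =>
          let lo := if pr.1 ≤ pr.2 then pr.1 else pr.2
          let hi := if pr.1 ≤ pr.2 then pr.2 else pr.1
          (PySem.List.pyRange lo (hi + 1) 1).foldl (fun counts p =>
            PySem.List.pySetD counts p (PySem.List.pyGetD counts p 0 + 1)) counts)
          (List.replicate (n + 1).toNat (0 : Int))) j 0 = pvCnt (s.zip (s.drop 1)) j := by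
      intro j hj
      rw [cget j hj, grep0 _ j hj]
      ring
    rw [hClen]
    rw [scanCongr (pvCnt (s.zip (s.drop 1)))
      (fun i => PySem.List.pyGetD ((s.zip (s.drop 1)).foldl (fun counts pr =>
          let lo := if pr.1 ≤ pr.2 then pr.1 else pr.2
          let hi := if pr.1 ≤ pr.2 then pr.2 else pr.1
          (PySem.List.pyRange lo (hi + 1) 1).foldl (fun counts p =>
            PySem.List.pySetD counts p (PySem.List.pyGetD counts p 0 + 1)) counts)
          (List.replicate (n + 1).toNat (0 : Int))) i 0)
      (n - 1).toNat 2 (n + 1) 1 (by omega)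
      (fun i h1 h2 => hCget i (by omega)) (hCget 1 (by omega))]
    -- A: peel the first index (i = 1 never changes most)
    rw [PySem.List.pyRange_one_cons (show (1 : Int) < n + 1 by omega)]
    simp only [List.foldl_cons]
    rw [if_neg (lt_irrefl _), show (1 : Int) + 1 = 2 from by norm_num]
    -- swap pvS for pvCnt on the remaining range
    rw [scanCongr (pvCnt (s.zip (s.drop 1))) (pvS n (s.zip (s.drop 1)))
      (n - 1).toNat 2 (n + 1) 1 (by omega)
      (fun i h1 h2 => pvS_eq_cnt n _ i (fun pr hpr => (hps pr hpr).2) (by omega))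
      (pvS_eq_cnt n _ 1 (fun pr hpr => (hps pr hpr).2) (by omega))]
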